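-- pv_equiv track=rewrite | github.com/AndrewS-hash/pyFiddle | pyFiddle_Intermediate.py | count_odd_binary_rotations
-- ===== SOURCE A (Python) =====
-- def count_odd_binary_rotations(binary_string: str, rotations: int) -> int:
--     """
--     Count the number of odd binary numbers obtained by rotating the binary string.
--
--     Args:
--     binary_string (str): The binary string to rotate.
--     rotations (int): The number of rotations to perform.
--
--     Returns:
--     int: The count of odd binary numbers.
--     """
--     # Initialize the count of odd numbers
--     count = 0
--     n = len(binary_string)
--
--     # Loop over the number of rotations and check each rotated string
--     for i in range(rotations):
--         rotated = binary_string[i % n:] + binary_string[:i % n]  # Perform rotation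
--         if rotated[-1] == '1':  # Check if the last bit is 1 (odd binary number)
--             count += 1
--
--     return count
-- ===== SOURCE B (Python) =====
-- def count_odd_binary_rotations(binary_string: str, rotations: int) -> int:
--     """Closed form: the last bit of rotation i is periodic in i with period n,
--     so count full cycles times total ones, plus the ones in the leftover prefix."""
--     if rotations <= 0:
--         return 0
--     n = len(binary_string)
--     full, rem = divmod(rotations, n)
--     ones = sum(c == '1' for c in binary_string)
--     extra = 0
--     if rem > 0:
--         if binary_string[-1] == '1':
--             extra += 1
--         extra += sum(c == '1' for c in binary_string[:rem - 1])
--     return full * ones + extra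
-- ===== Notes on version B (the rewrite author's own statement) =====
-- stated objective: faster
-- what changed: Replaces the per-rotation slice-and-concatenate loop by a closed form: the last bit of rotation i is periodic in i with period n, so B returns full_cycles * (ones in the string) plus the ones contributed by the leftover rotations (last char plus a prefix count).
-- outside the precondition, e.g. on count_odd_binary_rotations('', 3): A raises ZeroDivisionError, B raises ZeroDivisionError
import Mathlib
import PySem

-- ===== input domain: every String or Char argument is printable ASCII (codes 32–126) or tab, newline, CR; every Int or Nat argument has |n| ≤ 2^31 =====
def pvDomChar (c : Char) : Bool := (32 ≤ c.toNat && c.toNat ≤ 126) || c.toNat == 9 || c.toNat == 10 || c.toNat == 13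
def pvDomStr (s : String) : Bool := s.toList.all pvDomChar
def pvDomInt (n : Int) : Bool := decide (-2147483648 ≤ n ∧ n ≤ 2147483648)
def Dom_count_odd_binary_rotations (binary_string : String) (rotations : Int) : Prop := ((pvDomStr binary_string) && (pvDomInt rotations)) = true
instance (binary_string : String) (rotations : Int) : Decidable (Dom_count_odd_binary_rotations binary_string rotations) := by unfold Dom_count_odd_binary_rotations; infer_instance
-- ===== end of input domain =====

-- B replaces the per-rotation string rebuild by a closed form over the period-n last-bit pattern (asymptotically faster).


-- ===== PORT A =====
def count_odd_binary_rotations (binary_string : String) (rotations : Int) : Int :=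
  let chars := binary_string.toList
  let n : Int := (chars.length : Int)
  (PySem.List.pyRange 0 rotations 1).foldl
    (fun count i =>
      let m := PySem.Int.mod i n
      let rotated := PySem.List.slice chars (some m) none ++ PySem.List.slice chars none (some m)
      if PySem.List.pyGet? rotated (-1) = some '1' then count + 1 else count)
    0

-- ===== PORT B =====
def count_odd_binary_rotations_alt (binary_string : String) (rotations : Int) : Int :=
  if rotations ≤ 0 then 0
  else
    let chars := binary_string.toList
    let n : Int := (chars.length : Int)
    let full := PySem.Int.floordiv rotations n
    let rem := PySem.Int.mod rotations n
    let ones : Int := (chars.countP (· == '1') : Int)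
    let extra : Int :=
      if 0 < rem then
        (if PySem.List.pyGet? chars (-1) = some '1' then 1 else 0)
          + ((PySem.List.slice chars none (some (rem - 1))).countP (· == '1') : Int)
      else 0
    full * ones + extra

-- ===== PRECONDITION & SPEC =====
-- Pre_ excludes only the inputs on which A raises: empty string with rotations > 0 (ZeroDivisionError from i % n).
def Pre_count_odd_binary_rotations (binary_string : String) (rotations : Int) : Prop :=
  binary_string.toList ≠ [] ∨ rotations ≤ 0
instance (binary_string : String) (rotations : Int) : Decidable (Pre_count_odd_binary_rotations binary_string rotations) := by unfold Pre_count_odd_binary_rotations; infer_instance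

def pvWitness_count_odd_binary_rotations : String × Int := ("101", 5)

def Spec_count_odd_binary_rotations (binary_string : String) (rotations : Int) (out : Int) : Prop := out = count_odd_binary_rotations_alt binary_string rotations
instance (binary_string : String) (rotations : Int) (out : Int) : Decidable (Spec_count_odd_binary_rotations binary_string rotations out) := by unfold Spec_count_odd_binary_rotations; infer_instance

-- ===== CLAIM (what is proved, stated in full; the proofs are below) =====
def Claim_equal_count_odd_binary_rotations : Prop := ∀ (binary_string : String) (rotations : Int), Dom_count_odd_binary_rotations binary_string rotations → Pre_count_odd_binary_rotations binary_string rotations → Spec_count_odd_binary_rotations binary_string rotations (count_odd_binary_rotations binary_string rotations)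

-- ===== LEMMAS AND PROOFS =====

-- the last bit of rotation i, as a predicate on i
def pvLastBit (cs : List Char) (i : Nat) : Bool :=
  cs[(i + cs.length - 1) % cs.length]? == some '1'

lemma pvLastBit_periodic (cs : List Char) (hn : 0 < cs.length) (i : Nat) :
    pvLastBit cs (i + cs.length) = pvLastBit cs i := by
  unfold pvLastBit
  have : i + cs.length + cs.length - 1 = (i + cs.length - 1) + cs.length := by omega
  rw [this, Nat.add_mod_right]

lemma pvRotLast (cs : List Char) (m : Nat) (hm : m < cs.length) :
    (cs.drop m ++ cs.take m).getLast? = cs[(m + cs.length - 1) % cs.length]? := by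
  rcases Nat.eq_zero_or_pos m with h0 | hpos
  · subst h0
    simp only [List.drop_zero, List.take_zero, List.append_nil]
    rw [List.getLast?_eq_getElem?, Nat.zero_add,
      Nat.mod_eq_of_lt (show cs.length - 1 < cs.length by omega)]
  · have hlen : (cs.take m).length = m := by
      rw [List.length_take]; omega
    have hne : cs.take m ≠ [] := by
      intro hcontra; rw [hcontra] at hlen; simp at hlen; omega
    rw [List.getLast?_append_of_ne_nil _ hne, List.getLast?_eq_getElem?, List.length_take]
    have hmin : min m cs.length = m := by omega
    have h2 : (m + cs.length - 1) % cs.length = m - 1 := by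
      have h3 : m + cs.length - 1 = (m - 1) + cs.length := by omega
      rw [h3, Nat.add_mod_right, Nat.mod_eq_of_lt (by omega)]
    rw [hmin, h2, List.getElem?_take, if_pos (by omega)]

lemma pvCountPrefix (cs : List Char) :
    ∀ m, m ≤ cs.length →
      (List.range m).countP (fun i => cs[i]? == some '1') = (cs.take m).countP (· == '1') := by
  intro m
  induction m with
  | zero => simp
  | succ k ih =>
    intro h
    have hk : cs[k]? = some cs[k] := List.getElem?_eq_getElem (by omega)
    rw [List.range_succ, List.countP_append, ih (by omega)]
    conv_rhs => rw [List.take_add_one, hk]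
    rw [List.countP_append]
    simp only [Option.toList_some, List.countP_cons, List.countP_nil]
    by_cases hc : cs[k] = '1' <;> simp [hc, hk]

-- countP of the rotation pattern over a partial period m ≤ n, m > 0
lemma pvCountPat (cs : List Char) (m : Nat) (hpos : 0 < m) (hle : m ≤ cs.length) :
    (List.range m).countP (pvLastBit cs) =
      (if cs.getLast? = some '1' then 1 else 0) + (cs.take (m - 1)).countP (· == '1') := by
  have hn : 0 < cs.length := by omega
  obtain ⟨k, rfl⟩ : ∃ k, m = k + 1 := ⟨m - 1, by omega⟩
  rw [List.range_succ_eq_map, List.countP_cons, List.countP_map]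
  have h0 : pvLastBit cs 0 = (cs.getLast? == some '1') := by
    unfold pvLastBit
    rw [Nat.zero_add, Nat.mod_eq_of_lt (by omega), List.getLast?_eq_getElem?]
  have hcong : (List.range k).countP (pvLastBit cs ∘ Nat.succ)
      = (List.range k).countP (fun i => cs[i]? == some '1') := by
    apply List.countP_congr
    intro i hi
    have hik : i < k := List.mem_range.mp hi
    unfold pvLastBit
    simp only [Function.comp, Nat.succ_eq_add_one]
    have : (i + 1 + cs.length - 1) % cs.length = i := by
      have h4 : i + 1 + cs.length - 1 = i + cs.length := by omega
      rw [h4, Nat.add_mod_right, Nat.mod_eq_of_lt (by omega)]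
    rw [this]
  rw [hcong, pvCountPrefix cs k (by omega), h0]
  rcases h : cs.getLast? == some '1' <;> simp [beq_iff_eq] at h <;> simp [h, Nat.add_comm]

lemma pvCountPeriodic (p : Nat → Bool) (n : Nat) (hn : 0 < n) (hp : ∀ i, p (i + n) = p i) :
    ∀ r, (List.range r).countP p = (r / n) * (List.range n).countP p + (List.range (r % n)).countP p := by
  intro r
  induction r using Nat.strong_induction_on with
  | _ r ih =>
    by_cases h : r < n
    · rw [Nat.div_eq_of_lt h, Nat.mod_eq_of_lt h]; ring_nf
    · obtain ⟨k, rfl⟩ : ∃ k, r = n + k := ⟨r - n, by omega⟩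
      rw [List.range_add, List.countP_append, List.countP_map]
      have : (List.range k).countP (p ∘ (n + ·)) = (List.range k).countP p := by
        apply List.countP_congr; intro i _
        simp only [Function.comp]
        rw [Nat.add_comm n i, hp i]
      rw [this, ih k (by omega), Nat.add_comm n k, Nat.add_div_right _ hn, Nat.add_mod_right]
      ring

-- full period = total number of '1's
lemma pvCountFull (cs : List Char) (hn : 0 < cs.length) :
    (List.range cs.length).countP (pvLastBit cs) = cs.countP (· == '1') := by
  rw [pvCountPat cs cs.length hn le_rfl]
  have hsome : cs[cs.length - 1]? = some cs[cs.length - 1] := List.getElem?_eq_getElem (by omega)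
  have hsplit : cs = List.take (cs.length - 1) cs ++ [cs[cs.length - 1]] := by
    have h5 := List.take_add_one (l := cs) (i := cs.length - 1)
    rw [hsome] at h5
    simp only [Nat.sub_add_cancel hn, List.take_length, Option.toList_some] at h5
    exact h5
  conv_rhs => rw [hsplit]
  rw [List.countP_append, List.countP_singleton, List.getLast?_eq_getElem?, hsome]
  by_cases h : cs[cs.length - 1] = '1' <;> simp [h, Nat.add_comm]

-- A's fold equals the countP of the pattern
lemma pvAeqCount (s : String) (r : Nat) (hn : 0 < s.toList.length) :
    count_odd_binary_rotations s (r : Int) = ((List.range r).countP (pvLastBit s.toList) : Int) := by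
  unfold count_odd_binary_rotations
  simp only []
  rw [PySem.List.pyRange_zero_natCast, List.foldl_map]
  rw [PySem.List.foldl_congr_mem _ _
    (fun count (i : Nat) => if pvLastBit s.toList i then count + 1 else count) 0 ?_]
  · rw [PySem.List.foldl_if_add_one, zero_add]
  · intro acc i _
    rw [PySem.Int.mod_natCast]
    rw [PySem.List.slice_from_natCast, PySem.List.slice_to_natCast, PySem.List.pyGet?_neg_one]
    rw [pvRotLast s.toList (i % s.toList.length) (Nat.mod_lt _ hn)]
    unfold pvLastBit
    have heq : (i % s.toList.length + s.toList.length - 1) % s.toList.length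
        = (i + s.toList.length - 1) % s.toList.length := by
      have hdm := Nat.div_add_mod i s.toList.length
      have hmlt : i % s.toList.length < s.toList.length := Nat.mod_lt _ hn
      have hcomm : s.toList.length * (i / s.toList.length)
          = (i / s.toList.length) * s.toList.length := Nat.mul_comm _ _
      have hi2 : i + s.toList.length - 1
          = (i % s.toList.length + s.toList.length - 1) + (i / s.toList.length) * s.toList.length := by
        omega
      rw [hi2, Nat.add_mul_mod_self_right]
    rw [heq]
    rcases h : (s.toList[(i + s.toList.length - 1) % s.toList.length]? == some '1') <;>
      simp [beq_iff_eq] at h <;> simp [h]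

-- ===== VERDICT (by name: the statement is the Claim_ definition above) =====
theorem count_odd_binary_rotations_spec : Claim_equal_count_odd_binary_rotations := by
  intro s rot _ hpre
  unfold Spec_count_odd_binary_rotations
  by_cases hr : rot ≤ 0
  · unfold count_odd_binary_rotations count_odd_binary_rotations_alt
    simp only [if_pos hr]
    have : PySem.List.pyRange 0 rot 1 = [] := by
      simp [PySem.List.pyRange]; omega
    rw [this]; rfl
  · have hr0 : 0 < rot := by omega
    have hn : 0 < s.toList.length := by
      rcases hpre with h | h
      · exact List.length_pos_iff.mpr h
      · omega
    obtain ⟨r, rfl⟩ : ∃ r : Nat, rot = (r : Int) := ⟨rot.toNat, by omega⟩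
    have hr' : 0 < r := by exact_mod_cast hr0
    rw [pvAeqCount s r hn]
    unfold count_odd_binary_rotations_alt
    rw [if_neg (by omega)]
    simp only [PySem.Int.floordiv_natCast, PySem.Int.mod_natCast]
    rw [pvCountPeriodic (pvLastBit s.toList) s.toList.length hn
      (pvLastBit_periodic s.toList hn) r, pvCountFull s.toList hn]
    by_cases hm : 0 < r % s.toList.length
    · rw [if_pos (by exact_mod_cast hm)]
      rw [pvCountPat s.toList (r % s.toList.length) hm (le_of_lt (Nat.mod_lt _ hn))]
      have : ((r % s.toList.length : Nat) : Int) - 1 = ((r % s.toList.length - 1 : Nat) : Int) := by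
        omega
      rw [this, PySem.List.slice_to_natCast, PySem.List.pyGet?_neg_one]
      push_cast
      ring
    · rw [if_neg (by exact_mod_cast hm)]
      have : r % s.toList.length = 0 := by omega
      rw [this]
      simp
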